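-- pv_equiv track=rewrite | github.com/ruigomesbioinf/bioworkbench | bioworkbench/patternfinding.py | search_first_occ
-- ===== SOURCE A (Python) =====
-- def search_first_occ(seq: str, pattern: str) -> int:
--     """Return the position of the pattern or -1 if the pattern is not found.
--
--     Args:
--         seq (str): Sequence
--         pattern (str): Pattern to search
--
--     Returns:
--         int: Integer of first position of the patter in the sequence
--     """
--     found = False
--     i = 0
--     while i <= len(seq)-len(pattern) and not found:
--         j = 0
--         while j < len(pattern) and pattern[j]==seq[i+j]:
--             j += 1
--         if j == len(pattern): found = True
--         else: i += 1
--     if found == True: return i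
--     else: return -1
-- ===== SOURCE B (Python) =====
-- def search_first_occ(seq: str, pattern: str) -> int:
--     """Return the position of the pattern or -1 if the pattern is not found."""
--     return seq.find(pattern)
-- ===== Notes on version B (the rewrite author's own statement) =====
-- stated objective: idiomatic
-- what changed: Replaces the hand-written nested while-loop scan with Python's built-in str.find, which implements the same first-occurrence semantics (including empty pattern -> 0).
import Mathlib
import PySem

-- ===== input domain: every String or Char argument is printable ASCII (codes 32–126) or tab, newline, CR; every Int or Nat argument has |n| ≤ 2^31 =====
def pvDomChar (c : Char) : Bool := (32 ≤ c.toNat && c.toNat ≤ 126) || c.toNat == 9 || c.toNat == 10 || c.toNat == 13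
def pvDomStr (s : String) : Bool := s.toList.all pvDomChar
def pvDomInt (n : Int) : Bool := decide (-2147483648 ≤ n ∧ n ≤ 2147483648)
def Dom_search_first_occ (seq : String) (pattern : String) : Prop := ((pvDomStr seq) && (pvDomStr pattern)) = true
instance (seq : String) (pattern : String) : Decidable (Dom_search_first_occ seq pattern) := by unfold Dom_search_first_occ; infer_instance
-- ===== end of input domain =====

-- B replaces A's hand-written nested while-loop scan with the built-in str.find (same result, idiomatic).


-- ===== PORT A =====
-- inner while loop: 'while j < len(pattern) and pattern[j]==seq[i+j]: j += 1'; returns the final j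
def sfoInner (seq pat : List Char) (i : Nat) (j : Nat) : Nat :=
  if j < pat.length ∧ pat[j]? = seq[i+j]? then sfoInner seq pat i (j+1) else j
termination_by pat.length - j
decreasing_by omega

-- outer while loop: 'while i <= len(seq)-len(pattern) and not found: …'; found ⇒ return i, else -1
def sfoOuter (seq pat : List Char) (i : Nat) : Int :=
  if h : (i : Int) ≤ (seq.length : Int) - (pat.length : Int) then
    let j := sfoInner seq pat i 0
    if j = pat.length then (i : Int) else sfoOuter seq pat (i+1)
  else -1
termination_by seq.length + 1 - i
decreasing_by omega

def search_first_occ (seq : String) (pattern : String) : Int :=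
  sfoOuter seq.toList pattern.toList 0

-- ===== PORT B =====
def search_first_occ_alt (seq : String) (pattern : String) : Int :=
  PySem.Str.find seq pattern

-- ===== PRECONDITION & SPEC =====
def Spec_search_first_occ (seq : String) (pattern : String) (out : Int) : Prop := out = search_first_occ_alt seq pattern
instance (seq : String) (pattern : String) (out : Int) : Decidable (Spec_search_first_occ seq pattern out) := by unfold Spec_search_first_occ; infer_instance

-- ===== CLAIM (what is proved, stated in full; the proofs are below) =====
def Claim_equal_search_first_occ : Prop := ∀ (seq : String) (pattern : String), Dom_search_first_occ seq pattern → Spec_search_first_occ seq pattern (search_first_occ seq pattern)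

-- ===== LEMMAS AND PROOFS =====
-- the inner loop reaches len(pattern) iff every pattern position matches
theorem sfoInner_eq_iff (seq pat : List Char) (i : Nat) (j : Nat) (hj : j ≤ pat.length) :
    sfoInner seq pat i j = pat.length ↔ ∀ k, j ≤ k → k < pat.length → pat[k]? = seq[i+k]? := by
  generalize hn : pat.length - j = n
  induction n generalizing j with
  | zero =>
    have hj' : j = pat.length := by omega
    subst hj'
    rw [sfoInner, if_neg (by omega)]
    constructor
    · intro _ k h1 h2; omega
    · intro _; rfl
  | succ n ih =>
    rw [sfoInner]
    by_cases hc : j < pat.length ∧ pat[j]? = seq[i+j]?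
    · rw [if_pos hc, ih (j+1) (by omega) (by omega)]
      constructor
      · intro h k hk1 hk2
        rcases Nat.eq_or_lt_of_le hk1 with rfl | hlt
        · exact hc.2
        · exact h k hlt hk2
      · intro h k hk1 hk2; exact h k (by omega) hk2
    · rw [if_neg hc]
      constructor
      · intro h; omega
      · intro h; exact absurd ⟨by omega, h j le_rfl (by omega)⟩ hc

theorem prefix_iff_matches (seq pat : List Char) (i : Nat) :
    pat <+: seq.drop i ↔ ∀ k, k < pat.length → pat[k]? = seq[i+k]? := by
  constructor
  · intro h k hk
    obtain ⟨t, ht⟩ := h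
    have h1 : (seq.drop i)[k]? = pat[k]? := by
      rw [← ht, List.getElem?_append_left hk]
    rw [← h1, List.getElem?_drop]
  · intro h
    rw [List.prefix_iff_eq_take]
    apply List.ext_getElem?
    intro k
    by_cases hk : k < pat.length
    · rw [List.getElem?_take_of_lt hk, List.getElem?_drop, h k hk]
    · rw [List.getElem?_eq_none (by omega), List.getElem?_eq_none]
      simp [List.length_take]; omega

theorem sfoOuter_eq_neg_one (seq pat : List Char) (h : ∀ t, ¬ pat <+: seq.drop t) (i : Nat) :
    sfoOuter seq pat i = -1 := by
  generalize hn : seq.length + 1 - i = n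
  induction n generalizing i with
  | zero =>
    rw [sfoOuter, dif_neg (by omega)]
  | succ n ih =>
    rw [sfoOuter]
    by_cases hc : (i : Int) ≤ (seq.length : Int) - (pat.length : Int)
    · rw [dif_pos hc]
      have hne : sfoInner seq pat i 0 ≠ pat.length := by
        intro heq
        rw [sfoInner_eq_iff seq pat i 0 (by omega)] at heq
        exact h i ((prefix_iff_matches seq pat i).mpr (fun k hk => heq k (by omega) hk))
      simp only [if_neg hne]
      have hle : (i : Int) ≤ (seq.length : Int) := by
        have : (0:Int) ≤ (pat.length : Int) := by positivity
        omega
      exact ih (i+1) (by omega)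
    · rw [dif_neg hc]

theorem sfoOuter_eq_find (seq pat : List Char) (t : Nat)
    (hpre : pat <+: seq.drop t) (hmin : ∀ i' < t, ¬ pat <+: seq.drop i')
    (i : Nat) (hi : i ≤ t) : sfoOuter seq pat i = (t : Int) := by
  have hlen : t + pat.length ≤ seq.length := by
    rcases Nat.eq_zero_or_pos pat.length with h0 | h0
    · have ht0 : t = 0 := by
        by_contra ht
        exact hmin 0 (by omega) (by simp [List.eq_nil_of_length_eq_zero h0])
      have := hpre.length_le
      omega
    · have := hpre.length_le
      rw [List.length_drop] at this
      omega
  generalize hn : t - i = n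
  induction n generalizing i with
  | zero =>
    have hit : i = t := by omega
    subst hit
    rw [sfoOuter, dif_pos (by omega)]
    have heq : sfoInner seq pat i 0 = pat.length := by
      rw [sfoInner_eq_iff seq pat i 0 (by omega)]
      intro k _ hk
      exact ((prefix_iff_matches seq pat i).mp hpre) k hk
    simp only [if_pos heq]
  | succ n ih =>
    rw [sfoOuter, dif_pos (by omega)]
    have hne : sfoInner seq pat i 0 ≠ pat.length := by
      intro heq
      rw [sfoInner_eq_iff seq pat i 0 (by omega)] at heq
      exact hmin i (by omega) ((prefix_iff_matches seq pat i).mpr (fun k hk => heq k (by omega) hk))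
    simp only [if_neg hne]
    exact ih (i+1) (by omega) (by omega)

-- ===== VERDICT (by name: the statement is the Claim_ definition above) =====
theorem search_first_occ_spec : Claim_equal_search_first_occ := by
  intro seq pattern _
  unfold Spec_search_first_occ search_first_occ search_first_occ_alt
  rw [PySem.Str.find_eq]
  by_cases hinf : pattern.toList <:+: seq.toList
  · have hf : 0 ≤ PySem.Chars.find seq.toList pattern.toList :=
      (PySem.Chars.find_nonneg_iff _ _).mpr hinf
    obtain ⟨hpre, hmin⟩ := PySem.Chars.find_spec hf
    rw [sfoOuter_eq_find seq.toList pattern.toList _ hpre hmin 0 (by omega)]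
    exact Int.toNat_of_nonneg hf
  · rw [(PySem.Chars.find_eq_neg_one_iff _ _).mpr hinf]
    apply sfoOuter_eq_neg_one
    intro t hpre
    have : PySem.Chars.isIn pattern.toList seq.toList = true :=
      (PySem.Chars.exists_prefix_drop_iff_isIn _ _).mp ⟨t, hpre⟩
    rw [(PySem.Chars.isIn_eq_false_iff _ _).mpr hinf] at this
    exact absurd this (by simp)
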